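-- pv_equiv track=rewrite | github.com/sh1rokovs/Bioinformatics_programs | new/new_file.py | consist
-- ===== SOURCE A (Python) =====
-- import collections
--
-- def consist(peptide, def_spectrum):
--     reverse(peptide)
--     o_reverse(peptide)
--     count = collections.Counter([0] + [sum(peptide[1:][i:i + j])
--                                        for j in range(1, len(peptide[1:]) + 1)
--                                        for i in range(len(peptide[1:]) - j + 1)])
--     spec_count = collections.Counter(def_spectrum)
--     spec_count.subtract(count)
--     return all([i >= 0 for i in spec_count.values()])
--
-- def reverse(point):
--     for el in range(4):
--         point.append(120)
--     point.reverse()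
--
-- def o_reverse(point):
--     point.reverse()
--     for el in range(4):
--         point.pop()
-- ===== SOURCE B (Python) =====
-- def consist(peptide, def_spectrum):
--     # Note: A mutates `peptide` only transiently (appends four sentinels, double-reverses,
--     # pops them again), leaving it unchanged; B does not touch it at all.
--     q = peptide[1:]
--     n = len(q)
--     # prefix sums: pre[k] = sum of the first k elements of q
--     pre = [0]
--     s = 0
--     for x in q:
--         s += x
--         pre.append(s)
--     # multiset of subpeptide masses ({0} plus every contiguous-slice sum), each in O(1)
--     need = {0: 1}
--     for j in range(1, n + 1):
--         for i in range(n - j + 1):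
--             v = pre[i + j] - pre[i]
--             need[v] = need.get(v, 0) + 1
--     cnt = {}
--     for x in def_spectrum:
--         cnt[x] = cnt.get(x, 0) + 1
--     return all(need[k] <= cnt.get(k, 0) for k in need)
-- ===== Notes on version B (the rewrite author's own statement) =====
-- stated objective: faster
-- what changed: Replaces the O(n) sum() over each of the O(n^2) slices by prefix sums (each subpeptide mass in O(1)) and the Counter/subtract comparison by one dict of required counts checked against a dict of spectrum counts.
import Mathlib
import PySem

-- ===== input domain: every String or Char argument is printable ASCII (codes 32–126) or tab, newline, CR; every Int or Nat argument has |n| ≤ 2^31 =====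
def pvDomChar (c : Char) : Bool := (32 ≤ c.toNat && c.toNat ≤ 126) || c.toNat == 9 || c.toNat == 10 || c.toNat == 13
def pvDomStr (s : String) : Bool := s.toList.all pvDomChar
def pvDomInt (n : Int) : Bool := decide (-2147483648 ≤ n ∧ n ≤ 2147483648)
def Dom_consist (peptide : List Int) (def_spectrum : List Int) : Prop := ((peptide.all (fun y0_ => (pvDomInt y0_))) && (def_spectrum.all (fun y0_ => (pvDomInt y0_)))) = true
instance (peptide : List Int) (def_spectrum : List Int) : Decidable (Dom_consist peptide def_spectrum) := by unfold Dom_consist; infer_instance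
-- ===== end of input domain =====

-- B replaces A's O(n) sum() over each of the O(n^2) slices by prefix sums and the Counter
-- subtraction by a direct count comparison (faster, asymptotic); A mutates `peptide` only
-- transiently and leaves it unchanged, B does not touch it.


-- ===== PORT A =====
def consist (peptide : List Int) (def_spectrum : List Int) : Bool :=
  -- reverse(peptide): append 120 four times, then list.reverse()
  let p1 := (peptide ++ [120, 120, 120, 120]).reverse
  -- o_reverse(peptide): list.reverse(), then pop() four times; the list always has ≥ 4
  -- elements at this point (four were just appended), so each pop() is exactly dropLast
  let p2 := p1.reverse.dropLast.dropLast.dropLast.dropLast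
  let t := PySem.List.slice p2 (some 1) none     -- peptide[1:]
  let sums := (PySem.List.pyRange 1 ((t.length : Int) + 1) 1).flatMap (fun j =>
    (PySem.List.pyRange 0 ((t.length : Int) - j + 1) 1).map (fun i =>
      (PySem.List.slice t (some i) (some (i + j))).sum))
  let count := PySem.Dict.counter ((0 : Int) :: sums)
  let spec0 := PySem.Dict.counter def_spectrum
  -- spec_count.subtract(count): for each key of count in order, spec[k] = spec.get(k,0) - count[k]
  let specSub := count.items.foldl (fun d kv => d.insert kv.1 (d.getD kv.1 0 - kv.2)) spec0
  specSub.values.all (fun i => decide (0 ≤ i))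

-- ===== PORT B =====
def consist_alt (peptide : List Int) (def_spectrum : List Int) : Bool :=
  let q := PySem.List.slice peptide (some 1) none    -- peptide[1:]
  let n : Int := q.length
  -- pre = [0]; s = 0; for x in q: s += x; pre.append(s)
  let pre := (q.foldl (fun acc x => (acc.1 ++ [acc.2 + x], acc.2 + x)) (([0] : List Int), (0 : Int))).1
  -- need = {0: 1}; nested loops; pre[i+j] and pre[i] are always in range (0 ≤ i, i+j ≤ n),
  -- so pyGetD with default 0 is exact here
  let need := (PySem.List.pyRange 1 (n + 1) 1).foldl (fun d j =>
    (PySem.List.pyRange 0 (n - j + 1) 1).foldl (fun d i =>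
      let v := PySem.List.pyGetD pre (i + j) 0 - PySem.List.pyGetD pre i 0
      d.insert v (d.getD v 0 + 1)) d) ((PySem.Dict.empty : PySem.Dict Int Int).insert 0 1)
  let cnt := def_spectrum.foldl (fun d x => d.insert x (d.getD x 0 + 1)) (PySem.Dict.empty : PySem.Dict Int Int)
  need.keys.all (fun k => decide (need.getD k 0 ≤ cnt.getD k 0))

-- ===== PRECONDITION & SPEC =====
def Spec_consist (peptide : List Int) (def_spectrum : List Int) (out : Bool) : Prop := out = consist_alt peptide def_spectrum
instance (peptide : List Int) (def_spectrum : List Int) (out : Bool) : Decidable (Spec_consist peptide def_spectrum out) := by unfold Spec_consist; infer_instance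

-- ===== CLAIM (what is proved, stated in full; the proofs are below) =====
def Claim_equal_consist : Prop := ∀ (peptide : List Int) (def_spectrum : List Int), Dom_consist peptide def_spectrum → Spec_consist peptide def_spectrum (consist peptide def_spectrum)

-- ===== LEMMAS AND PROOFS =====

-- A's reverse/o_reverse pair leaves the list unchanged
theorem pvRoundtrip (p : List Int) :
    ((p ++ [120, 120, 120, 120]).reverse).reverse.dropLast.dropLast.dropLast.dropLast = p := by
  simp

-- B's prefix-sum loop computes (a ++ running sums, total)
theorem pvPreSpec (q : List Int) (a : List Int) (s : Int) :
    q.foldl (fun acc x => (acc.1 ++ [acc.2 + x], acc.2 + x)) (a, s) =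
      (a ++ (List.range q.length).map (fun k => s + (q.take (k + 1)).sum), s + q.sum) := by
  induction q generalizing a s with
  | nil => simp
  | cons x q ih =>
    simp only [List.foldl_cons, ih, List.length_cons, List.range_succ_eq_map, List.map_cons,
      List.map_map]
    refine Prod.ext ?_ ?_
    · simp [Function.comp_def, List.take_succ_cons, add_assoc, List.append_assoc]
    · simp [add_assoc]

theorem pvPreGet (q : List Int) (m : Int) (h0 : 0 ≤ m) (h1 : m ≤ (q.length : Int)) :
    PySem.List.pyGetD ((q.foldl (fun acc x => (acc.1 ++ [acc.2 + x], acc.2 + x))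
        (([0] : List Int), (0 : Int))).1) m 0 = (q.take m.toNat).sum := by
  rw [pvPreSpec, PySem.List.pyGetD_of_nonneg _ _ h0]
  rcases Nat.eq_zero_or_pos m.toNat with h | h
  · simp [h]
  · obtain ⟨t, ht⟩ : ∃ t, m.toNat = t + 1 := ⟨m.toNat - 1, by omega⟩
    have hm : t < q.length := by omega
    rw [ht, List.singleton_append, List.getD_cons_succ,
      PySem.List.getD_map_range _ _ _ _ hm]
    simp

-- a contiguous-slice sum is a difference of prefix sums
theorem pvSliceSum (t : List Int) (i j : Int) (hi : 0 ≤ i) (hj : 0 ≤ j) :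
    (PySem.List.slice t (some i) (some (i + j))).sum
      = (t.take (i + j).toNat).sum - (t.take i.toNat).sum := by
  have key : (t.take (i + j).toNat).sum
      = (t.take i.toNat).sum + ((t.drop i.toNat).take ((i + j).toNat - i.toNat)).sum := by
    conv_lhs => rw [show (i + j).toNat = i.toNat + ((i + j).toNat - i.toNat) from by omega]
    rw [List.take_add, List.sum_append]
  rw [PySem.List.slice_toNat t hi (by omega), key]
  ring

theorem pvFoldlFlatMap {α β σ : Type} (l : List α) (g : α → List β) (f : σ → β → σ) (init : σ) :
    (l.flatMap g).foldl f init = l.foldl (fun s a => (g a).foldl f s) init := by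
  induction l generalizing init <;> simp [List.foldl_append, *]

-- B's nested counting loop is a fold of the counting step over the flattened value list
theorem pvNestedFold (pre : List Int) (n : Int) (d0 : PySem.Dict Int Int) :
    (PySem.List.pyRange 1 (n + 1) 1).foldl (fun d j =>
      (PySem.List.pyRange 0 (n - j + 1) 1).foldl (fun d i =>
        d.insert (PySem.List.pyGetD pre (i + j) 0 - PySem.List.pyGetD pre i 0)
          (d.getD (PySem.List.pyGetD pre (i + j) 0 - PySem.List.pyGetD pre i 0) 0 + 1)) d) d0
    = ((PySem.List.pyRange 1 (n + 1) 1).flatMap (fun j =>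
        (PySem.List.pyRange 0 (n - j + 1) 1).map (fun i =>
          PySem.List.pyGetD pre (i + j) 0 - PySem.List.pyGetD pre i 0))).foldl
        (fun d v => d.insert v (d.getD v 0 + 1)) d0 := by
  rw [pvFoldlFlatMap]
  congr 1
  funext d j
  rw [List.foldl_map]

-- counting into {0: 1} is Counter([0] + values)
theorem pvCounterCons (L : List Int) :
    L.foldl (fun d v => d.insert v (d.getD v 0 + 1))
        ((PySem.Dict.empty : PySem.Dict Int Int).insert 0 1)
      = PySem.Dict.counter ((0 : Int) :: L) := by
  rw [← PySem.Dict.foldl_insert_getD_add_one_eq_counter]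
  simp only [List.foldl_cons]
  congr 1

-- A's slice sums and B's prefix-sum differences are the same list of masses
theorem pvSumsEq (q : List Int) :
    (PySem.List.pyRange 1 ((q.length : Int) + 1) 1).flatMap (fun j =>
      (PySem.List.pyRange 0 ((q.length : Int) - j + 1) 1).map (fun i =>
        (PySem.List.slice q (some i) (some (i + j))).sum))
    = (PySem.List.pyRange 1 ((q.length : Int) + 1) 1).flatMap (fun j =>
        (PySem.List.pyRange 0 ((q.length : Int) - j + 1) 1).map (fun i =>
          PySem.List.pyGetD ((q.foldl (fun acc x => (acc.1 ++ [acc.2 + x], acc.2 + x))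
              (([0] : List Int), (0 : Int))).1) (i + j) 0
          - PySem.List.pyGetD ((q.foldl (fun acc x => (acc.1 ++ [acc.2 + x], acc.2 + x))
              (([0] : List Int), (0 : Int))).1) i 0)) := by
  apply List.flatMap_congr
  intro j hj
  have hjb := PySem.List.mem_pyRange_one.mp hj
  apply List.map_congr_left
  intro i hi
  have hib := PySem.List.mem_pyRange_one.mp hi
  rw [pvSliceSum q i j (by omega) (by omega),
    pvPreGet q (i + j) (by omega) (by omega),
    pvPreGet q i (by omega) (by omega)]

-- Counter.subtract fold: a key not among the subtracted keys is untouched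
theorem pvSubGetDNotMem (l : List (Int × Int)) (s : PySem.Dict Int Int) (k : Int)
    (hk : k ∉ l.map Prod.fst) :
    (l.foldl (fun d kv => d.insert kv.1 (d.getD kv.1 0 - kv.2)) s).getD k 0 = s.getD k 0 := by
  induction l generalizing s with
  | nil => rfl
  | cons p l ih =>
    simp only [List.map_cons, List.mem_cons, not_or] at hk
    simp only [List.foldl_cons]
    rw [ih _ hk.2, PySem.Dict.getD_insert_of_ne _ _ _ hk.1]

-- a key subtracted exactly once (keys nodup) ends at s[k] - v
theorem pvSubGetDMem (l : List (Int × Int)) (hl : (l.map Prod.fst).Nodup)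
    (s : PySem.Dict Int Int) (k v : Int) (hkv : (k, v) ∈ l) :
    (l.foldl (fun d kv => d.insert kv.1 (d.getD kv.1 0 - kv.2)) s).getD k 0 = s.getD k 0 - v := by
  induction l generalizing s with
  | nil => simp at hkv
  | cons p l ih =>
    simp only [List.map_cons, List.nodup_cons] at hl
    rcases List.mem_cons.mp hkv with h | h
    · subst h
      simp only [List.foldl_cons]
      rw [pvSubGetDNotMem _ _ _ hl.1, PySem.Dict.getD_insert_self]
    · have hne : k ≠ p.1 := by
        intro he; exact hl.1 (he ▸ (List.mem_map.mpr ⟨(k, v), h, rfl⟩))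
      simp only [List.foldl_cons]
      rw [ih hl.2 _ h, PySem.Dict.getD_insert_of_ne _ _ _ hne]

-- the heart: "all values of s.subtract(c) are ≥ 0" = "every count of c is covered by s",
-- provided s has only nonnegative values
theorem pvMain (c s : PySem.Dict Int Int) (hc : c.keys.Nodup) (hs : s.keys.Nodup)
    (hsv : ∀ k, 0 ≤ s.getD k 0) :
    ((c.items.foldl (fun d kv => d.insert kv.1 (d.getD kv.1 0 - kv.2)) s).values.all
        (fun i => decide (0 ≤ i)))
      = (c.keys.all (fun k => decide (c.getD k 0 ≤ s.getD k 0))) := by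
  have hmapfst : c.items.map Prod.fst = c.keys := rfl
  set d' := c.items.foldl (fun d kv => d.insert kv.1 (d.getD kv.1 0 - kv.2)) s with hd'
  have hnd' : d'.keys.Nodup :=
    PySem.Dict.nodup_keys_foldl_insert_key c.items Prod.fst
      (fun d kv => d.getD kv.1 0 - kv.2) s hs
  have hkeys : d'.keys = PySem.Set.update s.keys c.keys := by
    rw [hd', ← hmapfst]
    exact PySem.Dict.keys_foldl_insert_key c.items Prod.fst
      (fun d kv => d.getD kv.1 0 - kv.2) s
  have hGmem : ∀ k ∈ c.keys, d'.getD k 0 = s.getD k 0 - c.getD k 0 := by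
    intro k hk
    refine pvSubGetDMem c.items (hmapfst ▸ hc) s k (c.getD k 0) ?_
    rw [PySem.Dict.items_eq_map_keys c hc 0]
    exact List.mem_map.mpr ⟨k, hk, rfl⟩
  rw [PySem.Dict.values_eq_map_keys d' hnd' 0, List.all_map, Bool.eq_iff_iff]
  simp only [List.all_eq_true, Function.comp, decide_eq_true_eq]
  constructor
  · intro h k hk
    have := h k (by rw [hkeys]; exact (PySem.Set.mem_update _ _ _).mpr (Or.inr hk))
    rw [hGmem k hk] at this
    omega
  · intro h k hk
    by_cases hkc : k ∈ c.keys
    · rw [hGmem k hkc]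
      have := h k hkc
      omega
    · rw [hd', pvSubGetDNotMem _ _ _ (by rw [hmapfst]; exact hkc)]
      exact hsv k

-- ===== VERDICT (by name: the statement is the Claim_ definition above) =====
theorem consist_spec : Claim_equal_consist := by
  intro p ds _
  unfold Spec_consist
  show consist p ds = consist_alt p ds
  simp only [consist, consist_alt, pvRoundtrip]
  rw [PySem.Dict.foldl_insert_getD_add_one_eq_counter ds,
    pvNestedFold, pvCounterCons, ← pvSumsEq]
  exact pvMain _ _ (PySem.Dict.nodup_keys_counter _) (PySem.Dict.nodup_keys_counter _)
    (fun k => by rw [PySem.Dict.getD_counter]; exact Int.natCast_nonneg _)
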